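-- pv_equiv track=rewrite | github.com/krimeano/euler-py | problem61.py | make_chains
-- ===== SOURCE A (Python) =====
-- def make_chains(old_chains, nnn):
--     chains = dict()
--     for ii in old_chains:
--         for j in range(len(nnn)):
--
--             if j in ii:
--                 continue
--             kk = ii + (j,)
--             cc = []
--             for mm in old_chains[ii]:
--                 m = mm[len(mm) - 1]
--                 for n in nnn[j]:
--                     if m % 100 == n // 100 and n not in mm:
--                         cc.append(mm + [n])
--             if not len(cc):
--                 continue
--             chains[kk] = cc
--     return chains
-- ===== SOURCE B (Python) =====
-- def make_chains(old_chains, nnn):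
--     # Build a prefix index once: first two digits -> [(j, n), ...] in j-then-list order.
--     index = {}
--     for j in range(len(nnn)):
--         for n in nnn[j]:
--             index.setdefault(n // 100, []).append((j, n))
--     chains = {}
--     for ii, mms in old_chains.items():
--         # Index-driven dispatch: extend each chain via the prefix index, bucketed by j.
--         buckets = {}
--         for mm in mms:
--             if not mm:
--                 continue
--             for j, n in index.get(mm[-1] % 100, []):
--                 if j not in ii and n not in mm:
--                     buckets.setdefault(j, []).append(mm + [n])
--         for j in range(len(nnn)):
--             if j in buckets:
--                 chains[ii + (j,)] = buckets[j]
--     return chains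
-- ===== Notes on version B (the rewrite author's own statement) =====
-- stated objective: faster
-- what changed: Instead of rescanning every list nnn[j] for every (key, chain) pair, B builds a prefix index (first two digits -> [(j, n)]) once, extends each chain only through its matching index entries into per-j buckets, and emits the buckets in j order; B also iterates dict items directly instead of re-looking up each key.
import Mathlib
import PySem

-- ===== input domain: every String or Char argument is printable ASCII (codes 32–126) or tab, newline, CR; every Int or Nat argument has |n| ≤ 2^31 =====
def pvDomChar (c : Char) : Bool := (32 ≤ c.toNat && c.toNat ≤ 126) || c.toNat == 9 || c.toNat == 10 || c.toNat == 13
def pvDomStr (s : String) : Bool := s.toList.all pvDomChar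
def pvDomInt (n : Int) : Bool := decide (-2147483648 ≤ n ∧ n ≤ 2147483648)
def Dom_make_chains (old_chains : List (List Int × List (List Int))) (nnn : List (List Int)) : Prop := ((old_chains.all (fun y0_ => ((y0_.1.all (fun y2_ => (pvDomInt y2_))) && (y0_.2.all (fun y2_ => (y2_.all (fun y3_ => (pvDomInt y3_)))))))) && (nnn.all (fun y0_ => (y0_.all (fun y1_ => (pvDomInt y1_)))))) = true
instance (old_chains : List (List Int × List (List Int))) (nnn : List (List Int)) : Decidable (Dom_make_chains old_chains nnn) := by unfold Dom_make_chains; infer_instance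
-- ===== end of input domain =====

-- B replaces A's per-key rescan of every figurate list with a prefix index built once and per-key buckets (different data structure / traversal).

-- ===== PORT A =====
def make_chains (old_chains : List (List Int × List (List Int))) (nnn : List (List Int)) : List (List Int × List (List Int)) :=
  (old_chains.foldl (fun chains pr =>
      let ii := pr.1
      (PySem.List.pyRange 0 (nnn.length : Int) 1).foldl (fun chains j =>
        if j ∈ ii then chains
        else
          let kk := ii ++ [j]
          let cc := ((PySem.Dict.mk old_chains).getD ii []).foldl (fun cc mm =>
            let m := PySem.List.pyGetD mm ((mm.length : Int) - 1) 0  -- Python raises here for mm = []; Pre_ excludes that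
            (PySem.List.pyGetD nnn j []).foldl (fun cc n =>
              if PySem.Int.mod m 100 = PySem.Int.floordiv n 100 ∧ n ∉ mm then cc ++ [mm ++ [n]] else cc) cc) []
          if cc.length = 0 then chains else chains.insert kk cc)
        chains)
    PySem.Dict.empty).items

-- ===== PORT B =====
def make_chains_alt (old_chains : List (List Int × List (List Int))) (nnn : List (List Int)) : List (List Int × List (List Int)) :=
  let index := (PySem.List.pyRange 0 (nnn.length : Int) 1).foldl (fun idx j =>
      (PySem.List.pyGetD nnn j []).foldl (fun idx n =>
        idx.modify (PySem.Int.floordiv n 100) [] (fun l => l ++ [(j, n)])) idx)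
    (PySem.Dict.empty)
  (old_chains.foldl (fun chains pr =>
      let ii := pr.1
      let buckets := pr.2.foldl (fun bk mm =>
          if mm = [] then bk
          else (index.getD (PySem.Int.mod (PySem.List.pyGetD mm (-1) 0) 100) []).foldl (fun bk q =>
            if q.1 ∉ ii ∧ q.2 ∉ mm then bk.modify q.1 [] (fun l => l ++ [mm ++ [q.2]]) else bk) bk)
        (PySem.Dict.empty)
      (PySem.List.pyRange 0 (nnn.length : Int) 1).foldl (fun chains j =>
        if buckets.contains j then chains.insert (ii ++ [j]) (buckets.getD j []) else chains) chains)
    PySem.Dict.empty).items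

-- ===== PRECONDITION & SPEC =====
-- Pre_ excludes association lists with duplicate keys (a Python dict cannot contain them; any
-- first/last-match choice is accidental) and exactly the inputs on which A raises IndexError:
-- a key ii holding an empty chain mm while some j in range(len(nnn)) lies outside ii, so A's
-- j-loop reaches mm and evaluates mm[len(mm)-1].
def Pre_make_chains (old_chains : List (List Int × List (List Int))) (nnn : List (List Int)) : Prop :=
  (old_chains.map (·.1)).Nodup ∧
  ∀ p ∈ old_chains, ∀ mm ∈ p.2, mm = [] →
    ∀ j ∈ PySem.List.pyRange 0 (nnn.length : Int) 1, j ∈ p.1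
instance (old_chains : List (List Int × List (List Int))) (nnn : List (List Int)) : Decidable (Pre_make_chains old_chains nnn) := by unfold Pre_make_chains; infer_instance

def pvWitness_make_chains : (List (List Int × List (List Int))) × List (List Int) :=
  ([([], [[1]])], [[105], [502, 101]])

def Spec_make_chains (old_chains : List (List Int × List (List Int))) (nnn : List (List Int)) (out : List (List Int × List (List Int))) : Prop := out = make_chains_alt old_chains nnn
instance (old_chains : List (List Int × List (List Int))) (nnn : List (List Int)) (out : List (List Int × List (List Int))) : Decidable (Spec_make_chains old_chains nnn out) := by unfold Spec_make_chains; infer_instance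

-- ===== CLAIM (what is proved, stated in full; the proofs are below) =====
def Claim_equal_make_chains : Prop := ∀ (old_chains : List (List Int × List (List Int))) (nnn : List (List Int)), Dom_make_chains old_chains nnn → Pre_make_chains old_chains nnn → Spec_make_chains old_chains nnn (make_chains old_chains nnn)

-- ===== LEMMAS AND PROOFS =====

-- mm[len(mm)-1] (port A) and mm[-1] (port B) read the same element of a nonempty list.
theorem pvGetLast_eq (mm : List Int) (h : mm ≠ []) :
    PySem.List.pyGetD mm ((mm.length : Int) - 1) 0 = PySem.List.pyGetD mm (-1) 0 := by
  have hlen : 0 < mm.length := List.length_pos_iff.mpr h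
  rw [PySem.List.pyGetD_neg_one mm 0 h,
    PySem.List.pyGetD_eq_getElem mm 0 (by omega) (by omega)]
  rw [List.getLast_eq_getElem]
  congr 1
  omega

-- a 'setdefault(key x, []).append(val x)' loop, characterised by final lookup
theorem pvGetD_keyed {κ β α : Type} [BEq κ] [LawfulBEq κ]
    (l : List β) (key : β → κ) (val : β → α) (d : PySem.Dict κ (List α)) (c : κ) :
    (l.foldl (fun d x => d.modify (key x) [] (fun s => s ++ [val x])) d).getD c []
      = d.getD c [] ++ (l.filter (fun x => key x == c)).map val := by
  have h := PySem.Dict.getD_foldl_modify_append (l.map (fun x => (key x, val x))) d c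
  simpa [List.foldl_map, List.filter_map, Function.comp] using h

-- the prefix index: final lookup of the two-level build loop
theorem pvIdx_getD (nnn : List (List Int)) (js : List Int)
    (d : PySem.Dict Int (List (Int × Int))) (c : Int) :
    (js.foldl (fun idx j =>
        (PySem.List.pyGetD nnn j []).foldl (fun idx n =>
          idx.modify (PySem.Int.floordiv n 100) [] (fun l => l ++ [(j, n)])) idx) d).getD c []
      = d.getD c [] ++ js.flatMap (fun j =>
          ((PySem.List.pyGetD nnn j []).filter (fun n => PySem.Int.floordiv n 100 == c)).map
            (fun n => (j, n))) := by
  induction js generalizing d with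
  | nil => simp
  | cons j js ih =>
    simp only [List.foldl_cons, List.flatMap_cons]
    rw [ih, pvGetD_keyed (key := fun n => PySem.Int.floordiv n 100) (val := fun n => (j, n))]
    simp [List.append_assoc]

-- every entry of the prefix index carries an index j drawn from range(len(nnn))
theorem pvIdx_mem (nnn : List (List Int)) (c : Int) (q : Int × Int)
    (hq : q ∈ ((PySem.List.pyRange 0 (nnn.length : Int) 1).foldl (fun idx j =>
        (PySem.List.pyGetD nnn j []).foldl (fun idx n =>
          idx.modify (PySem.Int.floordiv n 100) [] (fun l => l ++ [(j, n)])) idx)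
        PySem.Dict.empty).getD c []) :
    q.1 ∈ PySem.List.pyRange 0 (nnn.length : Int) 1 := by
  rw [pvIdx_getD, PySem.Dict.getD_empty, List.nil_append] at hq
  obtain ⟨j, hj, hqj⟩ := List.mem_flatMap.mp hq
  obtain ⟨n, _, hn⟩ := List.mem_map.mp hqj
  rw [← hn]
  exact hj

-- the per-key buckets: final lookup of the dispatch loop (with B's empty-chain guard)
theorem pvBk_getD (index : PySem.Dict Int (List (Int × Int))) (ii : List Int)
    (mms : List (List Int)) (d : PySem.Dict Int (List (List Int))) (c : Int) :
    (mms.foldl (fun bk mm =>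
        if mm = [] then bk
        else (index.getD (PySem.Int.mod (PySem.List.pyGetD mm (-1) 0) 100) []).foldl (fun bk q =>
          if q.1 ∉ ii ∧ q.2 ∉ mm then bk.modify q.1 [] (fun l => l ++ [mm ++ [q.2]]) else bk) bk) d).getD c []
      = d.getD c [] ++ mms.flatMap (fun mm =>
          if mm = [] then []
          else (((index.getD (PySem.Int.mod (PySem.List.pyGetD mm (-1) 0) 100) []).filter
              (fun q => decide (q.1 ∉ ii ∧ q.2 ∉ mm))).filter (fun q => q.1 == c)).map
            (fun q => mm ++ [q.2])) := by
  induction mms generalizing d with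
  | nil => simp
  | cons mm mms ih =>
    simp only [List.foldl_cons, List.flatMap_cons]
    by_cases hmm : mm = []
    · rw [if_pos hmm, if_pos hmm, ih]
      simp
    · rw [if_neg hmm, if_neg hmm, PySem.List.foldl_ite_eq_foldl_filter, ih,
        pvGetD_keyed (key := fun q : Int × Int => q.1) (val := fun q : Int × Int => mm ++ [q.2])]
      simp [List.append_assoc]

-- invariant: in an append-only bucket dict, a key is present iff its list is nonempty
def pvNE {κ α : Type} [BEq κ] (d : PySem.Dict κ (List α)) : Prop :=
  ∀ c, d.contains c = true ↔ d.getD c [] ≠ []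

theorem pvNE_empty {κ α : Type} [BEq κ] : pvNE (PySem.Dict.empty : PySem.Dict κ (List α)) := by
  intro c; simp [PySem.Dict.contains_empty, PySem.Dict.getD_empty]

theorem pvNE_modify {κ α : Type} [BEq κ] [LawfulBEq κ] [DecidableEq κ]
    (d : PySem.Dict κ (List α)) (k : κ) (v : α) (h : pvNE d) :
    pvNE (d.modify k [] (fun s => s ++ [v])) := by
  intro c
  rw [PySem.Dict.contains_modify, PySem.Dict.getD_modify]
  by_cases hc : c = k
  · simp [hc]
  · simpa [hc] using h c

theorem pvNE_foldl {κ α β : Type} [BEq κ] (l : List β)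
    (f : PySem.Dict κ (List α) → β → PySem.Dict κ (List α))
    (hf : ∀ d x, pvNE d → pvNE (f d x)) (d : PySem.Dict κ (List α)) (hd : pvNE d) :
    pvNE (l.foldl f d) := by
  induction l generalizing d with
  | nil => exact hd
  | cons x l ih => exact ih _ (hf d x hd)

-- the buckets dict satisfies the invariant
theorem pvNE_buckets (index : PySem.Dict Int (List (Int × Int))) (ii : List Int)
    (mms : List (List Int)) :
    pvNE (mms.foldl (fun bk mm =>
        if mm = [] then bk
        else (index.getD (PySem.Int.mod (PySem.List.pyGetD mm (-1) 0) 100) []).foldl (fun bk q =>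
          if q.1 ∉ ii ∧ q.2 ∉ mm then bk.modify q.1 [] (fun l => l ++ [mm ++ [q.2]]) else bk) bk)
      PySem.Dict.empty) := by
  apply pvNE_foldl _ _ _ _ pvNE_empty
  intro d mm hd
  by_cases hmm : mm = []
  · simpa [hmm] using hd
  · rw [if_neg hmm]
    apply pvNE_foldl _ _ _ _ hd
    intro d q hdq
    by_cases hq : q.1 ∉ ii ∧ q.2 ∉ mm
    · simpa [hq] using pvNE_modify d q.1 (mm ++ [q.2]) hdq
    · simpa [hq] using hdq

-- A's cc accumulation as one flatMap
theorem pvCc_flat (nnn : List (List Int)) (j : Int) (mms : List (List Int)) :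
    (mms.foldl (fun cc mm =>
        (PySem.List.pyGetD nnn j []).foldl (fun cc n =>
          if PySem.Int.mod (PySem.List.pyGetD mm ((mm.length : Int) - 1) 0) 100
                = PySem.Int.floordiv n 100 ∧ n ∉ mm
          then cc ++ [mm ++ [n]] else cc) cc) [])
      = mms.flatMap (fun mm =>
          ((PySem.List.pyGetD nnn j []).filter (fun n =>
            decide (PySem.Int.mod (PySem.List.pyGetD mm ((mm.length : Int) - 1) 0) 100
                = PySem.Int.floordiv n 100 ∧ n ∉ mm))).map (fun n => mm ++ [n])) := by
  rw [PySem.List.foldl_congr_mem mms _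
    (fun cc mm => cc ++ ((PySem.List.pyGetD nnn j []).filter (fun n =>
      decide (PySem.Int.mod (PySem.List.pyGetD mm ((mm.length : Int) - 1) 0) 100
          = PySem.Int.floordiv n 100 ∧ n ∉ mm))).map (fun n => mm ++ [n])) []
    (fun acc mm _ => PySem.List.foldl_append_ite _ _ _ _)]
  rw [PySem.List.foldl_append_eq_flatMap]
  simp

-- per-chain contribution to bucket j equals A's per-chain cc piece (j in range, j ∉ ii, mm nonempty)
theorem pvPiece_eq (nnn : List (List Int)) (ii : List Int) (j : Int) (mm : List Int)
    (hmm : mm ≠ []) (hj0 : 0 ≤ j) (hjl : j < (nnn.length : Int)) (hji : j ∉ ii) :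
    (((((PySem.List.pyRange 0 (nnn.length : Int) 1).foldl (fun idx j' =>
        (PySem.List.pyGetD nnn j' []).foldl (fun idx n =>
          idx.modify (PySem.Int.floordiv n 100) [] (fun l => l ++ [(j', n)])) idx)
        PySem.Dict.empty).getD (PySem.Int.mod (PySem.List.pyGetD mm (-1) 0) 100) []).filter
          (fun q => decide (q.1 ∉ ii ∧ q.2 ∉ mm))).filter (fun q => q.1 == j)).map
        (fun q => mm ++ [q.2])
      = ((PySem.List.pyGetD nnn j []).filter (fun n =>
          decide (PySem.Int.mod (PySem.List.pyGetD mm ((mm.length : Int) - 1) 0) 100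
              = PySem.Int.floordiv n 100 ∧ n ∉ mm))).map (fun n => mm ++ [n]) := by
  rw [pvIdx_getD, PySem.Dict.getD_empty, List.nil_append,
    List.filter_flatMap, List.filter_flatMap, List.map_flatMap,
    PySem.List.pyRange_one_append 0 j (nnn.length : Int) hj0 (le_of_lt hjl),
    PySem.List.pyRange_one_cons hjl, List.flatMap_append, List.flatMap_cons]
  have hside : ∀ (js : List Int), (∀ j' ∈ js, j' ≠ j) →
      (js.flatMap (fun j' =>
        (((((PySem.List.pyGetD nnn j' []).filter (fun n =>
            PySem.Int.floordiv n 100 == PySem.Int.mod (PySem.List.pyGetD mm (-1) 0) 100)).map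
            (fun n => (j', n))).filter (fun q => decide (q.1 ∉ ii ∧ q.2 ∉ mm))).filter
            (fun q => q.1 == j)).map (fun q => mm ++ [q.2]))) = [] := by
    intro js hjs
    apply List.flatMap_eq_nil_iff.mpr
    intro j' hj'
    have hne : j' ≠ j := hjs j' hj'
    simp [List.filter_map, Function.comp, hne]
  rw [hside _ (fun j' hj' => by
      have := PySem.List.mem_pyRange_one.mp hj'; omega),
    hside _ (fun j' hj' => by
      have := PySem.List.mem_pyRange_one.mp hj'; omega)]
  simp only [List.nil_append, List.append_nil]
  simp only [List.filter_map, Function.comp, List.filter_filter, List.map_map]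
  refine congrArg _ (List.filter_congr ?_)
  intro n hn
  rw [show PySem.List.pyGetD mm (-1) 0 = PySem.List.pyGetD mm ((mm.length : Int) - 1) 0 from
    (pvGetLast_eq mm hmm).symm]
  by_cases h1 : PySem.Int.mod (PySem.List.pyGetD mm ((mm.length : Int) - 1) 0) 100
      = PySem.Int.floordiv n 100 <;> by_cases h2 : n ∈ mm <;>
    simp [h2, hji, eq_comm, Bool.beq_eq_decide_eq]

-- bucket j content = A's cc (for j in range) when every chain of the key is nonempty
theorem pvBucket_j (nnn : List (List Int)) (ii : List Int) (mms : List (List Int))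
    (hmms : ∀ mm ∈ mms, mm ≠ []) (j : Int) (hj0 : 0 ≤ j) (hjl : j < (nnn.length : Int)) :
    ((mms.foldl (fun bk mm =>
        if mm = [] then bk
        else (((PySem.List.pyRange 0 (nnn.length : Int) 1).foldl (fun idx j' =>
            (PySem.List.pyGetD nnn j' []).foldl (fun idx n =>
              idx.modify (PySem.Int.floordiv n 100) [] (fun l => l ++ [(j', n)])) idx)
            PySem.Dict.empty).getD (PySem.Int.mod (PySem.List.pyGetD mm (-1) 0) 100) []).foldl
          (fun bk q =>
            if q.1 ∉ ii ∧ q.2 ∉ mm then bk.modify q.1 [] (fun l => l ++ [mm ++ [q.2]]) else bk) bk)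
        PySem.Dict.empty).getD j [])
      = if j ∈ ii then [] else
          mms.flatMap (fun mm =>
            ((PySem.List.pyGetD nnn j []).filter (fun n =>
              decide (PySem.Int.mod (PySem.List.pyGetD mm ((mm.length : Int) - 1) 0) 100
                  = PySem.Int.floordiv n 100 ∧ n ∉ mm))).map (fun n => mm ++ [n])) := by
  rw [pvBk_getD, PySem.Dict.getD_empty, List.nil_append]
  by_cases hji : j ∈ ii
  · rw [if_pos hji]
    apply List.flatMap_eq_nil_iff.mpr
    intro mm hmm
    rw [if_neg (hmms mm hmm)]
    have : (((((PySem.List.pyRange 0 (nnn.length : Int) 1).foldl (fun idx j' =>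
        (PySem.List.pyGetD nnn j' []).foldl (fun idx n =>
          idx.modify (PySem.Int.floordiv n 100) [] (fun l => l ++ [(j', n)])) idx)
        PySem.Dict.empty).getD (PySem.Int.mod (PySem.List.pyGetD mm (-1) 0) 100) []).filter
          (fun q => decide (q.1 ∉ ii ∧ q.2 ∉ mm))).filter (fun q => q.1 == j)) = [] := by
      apply List.filter_eq_nil_iff.mpr
      intro q hq
      have hqi : q.1 ∉ ii := by
        have := (List.mem_filter.mp hq).2
        simp only [decide_eq_true_eq] at this
        exact this.1
      simp only [beq_iff_eq]
      intro hqj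
      exact hqi (hqj ▸ hji)
    rw [this, List.map_nil]
  · rw [if_neg hji]
    refine List.flatMap_congr (fun mm hmm => ?_)
    rw [if_neg (hmms mm hmm)]
    exact pvPiece_eq nnn ii j mm (hmms mm hmm) hj0 hjl hji

-- when every j in range lies in ii, every bucket of the key is empty
theorem pvBucket_all_in (nnn : List (List Int)) (ii : List Int) (mms : List (List Int))
    (hii : ∀ j ∈ PySem.List.pyRange 0 (nnn.length : Int) 1, j ∈ ii) (c : Int) :
    ((mms.foldl (fun bk mm =>
        if mm = [] then bk
        else (((PySem.List.pyRange 0 (nnn.length : Int) 1).foldl (fun idx j' =>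
            (PySem.List.pyGetD nnn j' []).foldl (fun idx n =>
              idx.modify (PySem.Int.floordiv n 100) [] (fun l => l ++ [(j', n)])) idx)
            PySem.Dict.empty).getD (PySem.Int.mod (PySem.List.pyGetD mm (-1) 0) 100) []).foldl
          (fun bk q =>
            if q.1 ∉ ii ∧ q.2 ∉ mm then bk.modify q.1 [] (fun l => l ++ [mm ++ [q.2]]) else bk) bk)
        PySem.Dict.empty).getD c []) = [] := by
  rw [pvBk_getD, PySem.Dict.getD_empty, List.nil_append]
  apply List.flatMap_eq_nil_iff.mpr
  intro mm hmm
  by_cases hmmE : mm = []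
  · rw [if_pos hmmE]
  · rw [if_neg hmmE]
    have : ((((PySem.List.pyRange 0 (nnn.length : Int) 1).foldl (fun idx j' =>
        (PySem.List.pyGetD nnn j' []).foldl (fun idx n =>
          idx.modify (PySem.Int.floordiv n 100) [] (fun l => l ++ [(j', n)])) idx)
        PySem.Dict.empty).getD (PySem.Int.mod (PySem.List.pyGetD mm (-1) 0) 100) []).filter
          (fun q => decide (q.1 ∉ ii ∧ q.2 ∉ mm))) = [] := by
      apply List.filter_eq_nil_iff.mpr
      intro q hq
      have hqr := pvIdx_mem nnn _ q hq
      simp only [decide_eq_true_eq, not_and, not_not]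
      intro hqi
      exact absurd (hii q.1 hqr) hqi
    rw [this, List.filter_nil, List.map_nil]

-- a fold whose body fixes the accumulator on every element of the list is the identity
theorem pvFoldl_id {α β : Type} (l : List β) (f : α → β → α) (init : α)
    (h : ∀ acc, ∀ x ∈ l, f acc x = acc) : l.foldl f init = init := by
  induction l generalizing init with
  | nil => rfl
  | cons x l ih => rw [List.foldl_cons, h init x (by simp), ih]; intro acc y hy; exact h acc y (by simp [hy])

-- ===== VERDICT (by name: the statement is the Claim_ definition above) =====
theorem make_chains_spec : Claim_equal_make_chains := by
  intro oc nnn _ hpre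
  obtain ⟨hnd, hne⟩ := hpre
  simp only [Spec_make_chains, make_chains, make_chains_alt]
  congr 1
  apply PySem.List.foldl_congr_mem
  intro chains pr hpr
  have hget : (PySem.Dict.mk oc).getD pr.1 [] = pr.2 :=
    PySem.Dict.getD_of_mem_items _ (by simpa using hpr)
      (by simpa [PySem.Dict.keys_mk] using hnd) []
  simp only [hget]
  by_cases hE : ∀ mm ∈ pr.2, mm ≠ []
  · -- every chain of this key is nonempty: bucket j is exactly A's cc
    apply PySem.List.foldl_congr_mem
    intro ch j hj
    obtain ⟨hj0, hjl⟩ := PySem.List.mem_pyRange_one.mp hj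
    have hbj := pvBucket_j nnn pr.1 pr.2 hE j hj0 hjl
    have hcon := pvNE_buckets ((PySem.List.pyRange 0 (nnn.length : Int) 1).foldl (fun idx j' =>
        (PySem.List.pyGetD nnn j' []).foldl (fun idx n =>
          idx.modify (PySem.Int.floordiv n 100) [] (fun l => l ++ [(j', n)])) idx)
        PySem.Dict.empty) pr.1 pr.2 j
    by_cases hji : j ∈ pr.1
    · rw [if_pos hji]
      have hz : _ = ([] : List (List Int)) := hbj.trans (if_pos hji)
      rw [if_neg (fun h => (hcon.mp h) hz)]
    · rw [if_neg hji, pvCc_flat]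
      rw [if_neg hji] at hbj
      by_cases hcc : (pr.2.flatMap (fun mm =>
          ((PySem.List.pyGetD nnn j []).filter (fun n =>
            decide (PySem.Int.mod (PySem.List.pyGetD mm ((mm.length : Int) - 1) 0) 100
                = PySem.Int.floordiv n 100 ∧ n ∉ mm))).map (fun n => mm ++ [n]))) = []
      · rw [if_pos (List.length_eq_zero_iff.mpr hcc)]
        rw [if_neg (fun h => (hcon.mp h) (hbj.trans hcc))]
      · rw [if_neg (fun h => hcc (List.length_eq_zero_iff.mp h))]
        rw [if_pos (hcon.mpr (fun h => hcc (hbj.symm.trans h))), hbj]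
  · -- this key holds an empty chain: Pre_ forces every j in range into ii, so both sides skip
    push Not at hE
    obtain ⟨mm0, hmm0, hmm0E⟩ := hE
    have hii : ∀ j ∈ PySem.List.pyRange 0 (nnn.length : Int) 1, j ∈ pr.1 :=
      hne pr hpr mm0 hmm0 (by simpa using hmm0E)
    have hcon := pvNE_buckets ((PySem.List.pyRange 0 (nnn.length : Int) 1).foldl (fun idx j' =>
        (PySem.List.pyGetD nnn j' []).foldl (fun idx n =>
          idx.modify (PySem.Int.floordiv n 100) [] (fun l => l ++ [(j', n)])) idx)
        PySem.Dict.empty) pr.1 pr.2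
    rw [pvFoldl_id _ _ chains (fun acc j hj => if_pos (hii j hj)),
      pvFoldl_id _ _ chains (fun acc j hj => ?_)]
    exact if_neg (fun h => (hcon j).mp h (pvBucket_all_in nnn pr.1 pr.2 hii j))
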